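-- pv_equiv track=rewrite | github.com/clararc62/VideoEncoding_P1 | RL.py | RL
-- ===== SOURCE A (Python) =====
-- from collections import OrderedDict
--
-- def RL(input):
--     dict = OrderedDict.fromkeys(input,0)
--     for ch in input:
--         dict[ch]+=1
--
--     output = ''
--     for key,value in dict.items():
--         output = output+key+str(value)
--     return  output
-- ===== SOURCE B (Python) =====
-- def RL(input):
--     def go(s):
--         if not s:
--             return ''
--         ch = s[0]
--         rest = [c for c in s if c != ch]
--         return ch + str(len(s) - len(rest)) + go(rest)
--     return go(list(input))
-- ===== Notes on version B (the rewrite author's own statement) =====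
-- stated objective: alternative
-- what changed: Replaces A's single forward pass building an OrderedDict frequency table with an extract-and-remove recursion: take the first character, derive its count as the length drop after filtering out all its occurrences, and recurse on the filtered remainder.
import Mathlib
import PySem

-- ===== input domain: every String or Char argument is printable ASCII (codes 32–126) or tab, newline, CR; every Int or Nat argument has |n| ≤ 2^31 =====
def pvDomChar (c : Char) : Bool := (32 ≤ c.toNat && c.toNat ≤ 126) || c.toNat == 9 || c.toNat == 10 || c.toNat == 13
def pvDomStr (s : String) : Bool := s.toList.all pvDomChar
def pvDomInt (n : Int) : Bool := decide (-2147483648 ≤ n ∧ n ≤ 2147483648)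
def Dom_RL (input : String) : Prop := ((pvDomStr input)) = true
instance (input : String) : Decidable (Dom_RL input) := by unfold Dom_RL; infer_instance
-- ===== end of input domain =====

-- B replaces A's single-pass OrderedDict frequency table by an extract-and-remove recursion (count = length drop after filtering); alternative decomposition, same results.


-- ===== PORT A =====
-- OrderedDict.fromkeys(input, 0); then dict[ch] += 1 per char; then concatenate key+str(value) over items.
def RL (input : String) : String :=
  let cs := input.toList
  let d0 : PySem.Dict Char Int := cs.foldl (fun d c => d.insert c 0) PySem.Dict.empty
  let d := cs.foldl (fun d c => d.insert c (d.getD c 0 + 1)) d0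
  String.mk (d.items.foldl (fun out p => out ++ [p.1] ++ PySem.Int.toChars p.2) [])

-- ===== PORT B =====
-- go(s): take s[0], filter out all its occurrences, count = length difference, recurse on the rest.

def rlGo (s : List Char) : List Char :=
  match s with
  | [] => []
  | c :: t =>
    let rest := (c :: t).filter (fun x => x ≠ c)
    c :: (PySem.Int.toChars (((c :: t).length : Int) - (rest.length : Int)) ++ rlGo rest)
termination_by s.length
decreasing_by
  simp only [List.filter_cons, decide_not, ne_eq, List.length_cons]
  simp only [decide_true, Bool.not_true, Bool.false_eq_true, if_false]
  exact Nat.lt_succ_of_le (List.length_filter_le _ t)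


def RL_alt (input : String) : String := String.mk (rlGo input.toList)

-- ===== PRECONDITION & SPEC =====
def Spec_RL (input : String) (out : String) : Prop := out = RL_alt input
instance (input : String) (out : String) : Decidable (Spec_RL input out) := by unfold Spec_RL; infer_instance

-- ===== CLAIM (what is proved, stated in full; the proofs are below) =====
def Claim_equal_RL : Prop := ∀ (input : String), Dom_RL input → Spec_RL input (RL input)

-- ===== LEMMAS AND PROOFS =====


-- fromkeys(…, 0) gives every char the value 0 (whether present as a key or looked up by default)
theorem getD_fromkeys_zero (cs : List Char) (e : PySem.Dict Char Int) (v : Char)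
    (h : e.getD v 0 = 0) : (cs.foldl (fun d c => d.insert c 0) e).getD v 0 = 0 := by
  induction cs generalizing e with
  | nil => exact h
  | cons c t ih =>
      apply ih
      rw [PySem.Dict.getD_insert]
      split <;> simp [h]

-- the tallied dict's items are the distinct chars paired with their counts
theorem items_tally (cs : List Char) :
    ((cs.foldl (fun d c => d.insert c (d.getD c 0 + 1))
        (cs.foldl (fun d c => d.insert c 0) PySem.Dict.empty)).items)
      = (PySem.Set.ofList cs).map (fun k => (k, (cs.count k : Int))) := by
  set d0 : PySem.Dict Char Int := cs.foldl (fun d c => d.insert c 0) PySem.Dict.empty with hd0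
  set d := cs.foldl (fun d c => d.insert c (d.getD c 0 + 1)) d0 with hd
  have hk0 : d0.keys = PySem.Set.ofList cs := by
    rw [hd0, PySem.Dict.keys_foldl_insert]
    exact PySem.Set.update_nil_left cs
  have hk : d.keys = PySem.Set.ofList cs := by
    rw [hd, PySem.Dict.keys_foldl_insert, hk0, PySem.Set.update_eq_append_filter]
    have : (PySem.Set.ofList cs).filter (fun y => !(PySem.Set.contains (PySem.Set.ofList cs) y)) = [] := by
      rw [List.filter_eq_nil_iff]
      intro a ha
      have := (PySem.Set.mem_ofList cs a).mp ha
      simp [PySem.Set.contains_eq_listContains, this]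
    rw [this, List.append_nil]
  have hnd : d.keys.Nodup := by rw [hk]; exact PySem.Set.nodup_ofList cs
  have hget : ∀ v, d.getD v 0 = (cs.count v : Int) := by
    intro v
    rw [hd, PySem.Dict.getD_foldl_insert_add_one,
        getD_fromkeys_zero cs PySem.Dict.empty v (by simp [PySem.Dict.getD_empty])]
    simp
  rw [PySem.Dict.items_eq_map_keys d hnd 0, hk]
  exact List.map_congr_left (fun k _ => by rw [hget k])

theorem length_sub_filter_eq_count (s : List Char) (c : Char) :
    ((s.length : Int) - ((s.filter (fun x => x ≠ c)).length : Int)) = (s.count c : Int) := by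
  induction s with
  | nil => simp
  | cons a t ih =>
    by_cases h : a = c <;>
      · simp only [List.filter_cons, List.count_cons, ne_eq, decide_not, List.length_cons, h] at ih ⊢
        simp [h] at ih ⊢
        push_cast at ih ⊢
        omega

theorem ofList_filter (p : Char → Bool) (xs : List Char) :
    (PySem.Set.ofList xs).filter p = PySem.Set.ofList (xs.filter p) := by
  induction xs with
  | nil => rfl
  | cons x t ih =>
    have hdis : ∀ (s : List Char) (y : Char), PySem.Set.discard s y = s.filter (fun z => !(z == y)) := by
      intro s y; unfold PySem.Set.discard; rfl
    by_cases hp : p x = true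
    · rw [PySem.Set.ofList_cons, List.filter_cons]
      simp only [hp, if_true, List.filter_cons, hdis]
      rw [PySem.Set.ofList_cons, hdis, ← ih, List.filter_filter, List.filter_filter]
      exact congrArg _ (List.filter_congr (fun a _ => Bool.and_comm _ _))
    · have hb : p x = false := by simpa using hp
      rw [PySem.Set.ofList_cons, List.filter_cons]
      simp only [hb, hdis, List.filter_cons, Bool.false_eq_true, if_false]
      rw [List.filter_filter, ← ih]
      apply List.filter_congr
      intro a _
      by_cases hy : a = x
      · subst hy; simp [hb]
      · simp [hy]

theorem discard_ofList_eq (xs : List Char) (x : Char) :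
    PySem.Set.discard (PySem.Set.ofList xs) x = PySem.Set.ofList (xs.filter (fun y => y ≠ x)) := by
  have hdis : PySem.Set.discard (PySem.Set.ofList xs) x = (PySem.Set.ofList xs).filter (fun z => !(z == x)) := by
    unfold PySem.Set.discard; rfl
  rw [hdis, ofList_filter]
  exact congrArg _ (List.filter_congr (fun a _ => by by_cases h : a = x <;> simp [h]))


theorem flatMap_congr_mem (l : List Char) (f g : Char → List Char) (h : ∀ x ∈ l, f x = g x) :
    l.flatMap f = l.flatMap g := by
  induction l with
  | nil => rfl
  | cons x t ih => simp only [List.flatMap_cons]; rw [h x (by simp), ih (fun y hy => h y (by simp [hy]))]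

theorem rlGo_eq (s : List Char) :
    rlGo s = (PySem.Set.ofList s).flatMap (fun k => k :: PySem.Int.toChars ((s.count k : Int))) := by
  induction s using rlGo.induct with
  | case1 => simp [rlGo]
  | case2 c t rest ih =>
    rw [rlGo]
    have hrest : (c :: t).filter (fun x => x ≠ c) = t.filter (fun x => x ≠ c) := by
      simp
    rw [length_sub_filter_eq_count (c :: t) c]
    rw [PySem.Set.ofList_cons, discard_ofList_eq, ← hrest, List.flatMap_cons]
    simp only [List.cons_append]
    congr 1
    rw [ih]
    congr 1
    apply flatMap_congr_mem
    intro k hk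
    have hk' := (PySem.Set.mem_ofList _ k).mp hk
    have hkc : (fun x => decide (x ≠ c)) k = true := (List.mem_filter.mp hk').2
    show k :: PySem.Int.toChars ((List.count k ((c :: t).filter (fun x => decide (x ≠ c))) : Int)) = _
    rw [List.count_filter (p := fun x => decide (x ≠ c)) hkc]

-- ===== VERDICT (by name: the statement is the Claim_ definition above) =====
theorem RL_spec : Claim_equal_RL := by
  intro input _
  unfold Spec_RL RL RL_alt
  simp only
  rw [items_tally input.toList, rlGo_eq]
  simp only [List.foldl_map, List.append_assoc, List.singleton_append]
  rw [PySem.List.foldl_append_eq_flatMap]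
  simp
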